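-- pv_equiv track=rewrite | github.com/bladnman/footballing | src/game_utils.py | get_weathers
-- ===== SOURCE A (Python) =====
-- def get_weathers(weather_str):
--     '''
--     Given a weather string will return the following
--     - temperature
--     - wind
--     - humidity
--     '''
--     def weather_pieces(weather_parts):
--         temp_bit = None
--         wind_bit = None
--         humid_bit = None
--
--         def to_int(in_str):
--             numeric_filter = filter(str.isdigit, in_str)
--             return int("".join(numeric_filter))
--
--         for part in weather_parts:
--             if 'degrees' in part:
--                 temp_bit = to_int(part)
--             elif 'humidity' in part:
--                 humid_bit = to_int(part)
--             elif 'mph' in part: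
--                 wind_bit = to_int(part)
--         return (temp_bit, wind_bit, humid_bit)
--
--     if weather_str is None: return (None, None, None)
--
--     weather_parts = weather_str.split(', ')
--     temperature, wind_speed, humidity = weather_pieces(weather_parts)
--     return (temperature, wind_speed, humidity)
-- ===== SOURCE B (Python) =====
-- def get_weathers(weather_str):
--     if weather_str is None:
--         return (None, None, None)
--     parts = weather_str.split(', ')
--
--     def to_int(in_str):
--         numeric_filter = filter(str.isdigit, in_str)
--         return int("".join(numeric_filter))
--
--     def last_value(pred):
--         # last matching part wins, mirroring repeated assignment
--         for part in reversed(parts):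
--             if pred(part):
--                 return to_int(part)
--         return None
--
--     temperature = last_value(lambda p: 'degrees' in p)
--     wind_speed = last_value(lambda p: 'mph' in p and 'degrees' not in p and 'humidity' not in p)
--     humidity = last_value(lambda p: 'humidity' in p and 'degrees' not in p)
--     return (temperature, wind_speed, humidity)
-- ===== Notes on version B (the rewrite author's own statement) =====
-- stated objective: alternative
-- what changed: A's single stateful pass with an if/elif chain over a mutable (temp, wind, humid) triple is replaced by three independent last-match searches over the reversed parts list, one per field, each applying to_int only to the part it finds.
import Mathlib
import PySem

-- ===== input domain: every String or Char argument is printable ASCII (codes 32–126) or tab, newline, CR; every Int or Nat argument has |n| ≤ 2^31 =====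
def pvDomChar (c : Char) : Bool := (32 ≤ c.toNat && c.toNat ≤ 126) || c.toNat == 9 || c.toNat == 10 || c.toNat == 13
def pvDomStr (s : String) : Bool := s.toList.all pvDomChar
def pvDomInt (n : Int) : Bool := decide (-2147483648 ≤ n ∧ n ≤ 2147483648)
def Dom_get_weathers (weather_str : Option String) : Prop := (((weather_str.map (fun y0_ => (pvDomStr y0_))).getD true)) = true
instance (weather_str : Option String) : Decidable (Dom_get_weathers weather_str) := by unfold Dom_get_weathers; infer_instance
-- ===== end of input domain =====

-- B replaces A's single stateful elif loop by three independent last-match searches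
-- over the parts (objective: alternative decomposition; same cost).

-- shared helper: to_int, the digit-filter-then-int of both Pythons
-- (Option-valued: 'none' = the int('') ValueError, excluded by Pre_)
def pvToInt (cs : List Char) : Option Int :=
  PySem.Int.ofChars? (cs.filter PySem.Chars.isdigit)

def pvDegP (p : List Char) : Bool := PySem.Chars.isIn "degrees".toList p
def pvHumP (p : List Char) : Bool := PySem.Chars.isIn "humidity".toList p
def pvMphP (p : List Char) : Bool := PySem.Chars.isIn "mph".toList p

-- ===== PORT A =====
-- A's loop body: the if/elif/elif chain over the running (temp, wind, humid) state
def pvStepA (st : Option Int × Option Int × Option Int) (part : List Char) :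
    Option Int × Option Int × Option Int :=
  if pvDegP part then (pvToInt part, st.2.1, st.2.2)
  else if pvHumP part then (st.1, st.2.1, pvToInt part)
  else if pvMphP part then (st.1, pvToInt part, st.2.2)
  else st

def get_weathers (weather_str : Option String) : Option Int × Option Int × Option Int :=
  match weather_str with
  | none => (none, none, none)
  | some s =>
    let weather_parts := PySem.Chars.splitOn s.toList ", ".toList
    weather_parts.foldl pvStepA (none, none, none)

-- ===== PORT B =====
-- B's last_value: scan the parts in reverse, return to_int of the first match, else None
def pvLastValue (parts : List (List Char)) (pred : List Char → Bool) : Option Int :=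
  match parts.reverse.find? pred with
  | some p => pvToInt p
  | none => none

def get_weathers_alt (weather_str : Option String) : Option Int × Option Int × Option Int :=
  match weather_str with
  | none => (none, none, none)
  | some s =>
    let parts := PySem.Chars.splitOn s.toList ", ".toList
    (pvLastValue parts (fun p => pvDegP p),
     pvLastValue parts (fun p => pvMphP p && !pvDegP p && !pvHumP p),
     pvLastValue parts (fun p => pvHumP p && !pvDegP p))

-- ===== PRECONDITION & SPEC =====
-- Pre_ excludes exactly the inputs where A raises ValueError: a part that contains
-- one of the keywords but no digit makes A's to_int pass a digit-free string to int.
def Pre_get_weathers (weather_str : Option String) : Prop :=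
  ∀ p ∈ (weather_str.elim [] (fun s => PySem.Chars.splitOn s.toList ", ".toList)),
    (PySem.Chars.isIn "degrees".toList p || PySem.Chars.isIn "humidity".toList p
      || PySem.Chars.isIn "mph".toList p) = true →
    p.any PySem.Chars.isdigit = true

instance (weather_str : Option String) : Decidable (Pre_get_weathers weather_str) := by
  unfold Pre_get_weathers; infer_instance

def pvWitness_get_weathers : Option String := some "72 degrees, 10 mph, 45% humidity"

def Spec_get_weathers (weather_str : Option String) (out : Option Int × Option Int × Option Int) : Prop := out = get_weathers_alt weather_str
instance (weather_str : Option String) (out : Option Int × Option Int × Option Int) : Decidable (Spec_get_weathers weather_str out) := by unfold Spec_get_weathers; infer_instance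

-- ===== CLAIM (what is proved, stated in full; the proofs are below) =====
def Claim_equal_get_weathers : Prop := ∀ (weather_str : Option String), Dom_get_weathers weather_str → Pre_get_weathers weather_str → Spec_get_weathers weather_str (get_weathers weather_str)

-- ===== LEMMAS AND PROOFS =====

-- A's loop from an arbitrary state equals B's three reverse searches, falling back
-- to the state's components when a search finds nothing.
theorem pvLoopA_eq (parts : List (List Char)) (t w h : Option Int) :
    parts.foldl pvStepA (t, w, h) =
      ((parts.reverse.find? (fun p => pvDegP p)).elim t pvToInt,
       (parts.reverse.find? (fun p => pvMphP p && !pvDegP p && !pvHumP p)).elim w pvToInt,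
       (parts.reverse.find? (fun p => pvHumP p && !pvDegP p)).elim h pvToInt) := by
  induction parts generalizing t w h with
  | nil => simp
  | cons p rest ih =>
    simp only [List.foldl_cons, List.reverse_cons, List.find?_append]
    by_cases hd : pvDegP p <;> by_cases hh : pvHumP p <;> by_cases hm : pvMphP p <;>
      simp [pvStepA, hd, hh, hm, ih] <;>
      cases rest.reverse.find? (fun p => pvDegP p) <;>
      cases rest.reverse.find? (fun p => pvMphP p && !pvDegP p && !pvHumP p) <;>
      cases rest.reverse.find? (fun p => pvHumP p && !pvDegP p) <;>
      simp

-- ===== VERDICT (by name: the statement is the Claim_ definition above) =====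
theorem get_weathers_spec : Claim_equal_get_weathers := by
  intro ws _ _
  unfold Spec_get_weathers get_weathers get_weathers_alt
  cases ws with
  | none => rfl
  | some s =>
    simp only [pvLoopA_eq, pvLastValue]
    refine Prod.ext ?_ (Prod.ext ?_ ?_) <;>
      · dsimp only
        cases (PySem.Chars.splitOn s.toList ", ".toList).reverse.find? _ <;> rfl
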